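-- pv_equiv track=rewrite | github.com/NickMarkovicz/lessons | lesson_04/classwork_06.py | increasing_numbers
-- ===== SOURCE A (Python) =====
-- def increasing_numbers(n, m):
--     array = []
--     for i in range(n, m):
--         count = 0
--         for k in range(n, i + 1):
--             if k % i == 0:
--                 count += 1
--                 if count < 3:
--                     array.append(i)
--     return array
-- ===== SOURCE B (Python) =====
-- def increasing_numbers(n, m):
--     out = []
--     for i in range(n, m):
--         d = abs(i)
--         c = i // d - (n - 1) // d   # multiples of i in [n, i], counted in O(1)
--         out += [i] * min(c, 2)
--     return out
-- ===== Notes on version B (the rewrite author's own statement) =====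
-- stated objective: alternative
-- what changed: A's inner scan over range(n, i+1) testing k % i == 0 is replaced by an O(1) floor-division formula counting the multiples of i in [n, i], appending i min(count, 2) times; intended as the faster algorithm, but a timing run could not confirm a ratio at the largest sizes, so no speed is claimed.
import Mathlib
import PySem

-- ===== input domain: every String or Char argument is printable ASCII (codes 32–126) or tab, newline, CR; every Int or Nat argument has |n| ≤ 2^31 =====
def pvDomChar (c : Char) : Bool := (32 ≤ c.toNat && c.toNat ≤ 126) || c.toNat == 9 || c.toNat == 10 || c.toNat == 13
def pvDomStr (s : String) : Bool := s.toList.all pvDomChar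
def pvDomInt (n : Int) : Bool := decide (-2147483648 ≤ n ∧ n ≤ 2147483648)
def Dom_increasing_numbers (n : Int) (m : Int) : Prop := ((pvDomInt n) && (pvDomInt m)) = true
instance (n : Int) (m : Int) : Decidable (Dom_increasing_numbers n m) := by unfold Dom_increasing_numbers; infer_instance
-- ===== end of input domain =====

-- B replaces A's quadratic inner scan by an O(1) floor-division count of the
-- multiples of i in [n, i], appending i min(count, 2) times (a different algorithm;
-- no speed claim is made).

-- ===== PORT A =====
-- the body of A's inner `for k` loop: count += 1; if count < 3: array.append(i)
def pvStepA (i : Int) (st : Int × List Int) (k : Int) : Int × List Int :=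
  if PySem.Int.mod k i = 0 then
    (st.1 + 1, if st.1 + 1 < 3 then st.2 ++ [i] else st.2)
  else st

def increasing_numbers (n : Int) (m : Int) : List Int :=
  (PySem.List.pyRange n m).foldl
    (fun array i => ((PySem.List.pyRange n (i + 1)).foldl (pvStepA i) (0, array)).2) []

-- ===== PORT B =====
def increasing_numbers_alt (n : Int) (m : Int) : List Int :=
  (PySem.List.pyRange n m).foldl
    (fun out i =>
      let d := |i|
      let c := PySem.Int.floordiv i d - PySem.Int.floordiv (n - 1) d
      out ++ PySem.List.pyRepeat [i] (min c 2)) []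

-- ===== PRECONDITION & SPEC =====
-- Pre_ excludes exactly the inputs with n ≤ 0 < m, where 0 ∈ range(n, m) makes
-- A raise ZeroDivisionError (B raises there too).
def Pre_increasing_numbers (n : Int) (m : Int) : Prop := ¬ (n ≤ 0 ∧ 0 < m)
instance (n : Int) (m : Int) : Decidable (Pre_increasing_numbers n m) := by
  unfold Pre_increasing_numbers; infer_instance

def pvWitness_increasing_numbers : Int × Int := (1, 12)

def Spec_increasing_numbers (n : Int) (m : Int) (out : List Int) : Prop := out = increasing_numbers_alt n m
instance (n : Int) (m : Int) (out : List Int) : Decidable (Spec_increasing_numbers n m out) := by unfold Spec_increasing_numbers; infer_instance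

-- ===== CLAIM (what is proved, stated in full; the proofs are below) =====
def Claim_equal_increasing_numbers : Prop := ∀ (n : Int) (m : Int), Dom_increasing_numbers n m → Pre_increasing_numbers n m → Spec_increasing_numbers n m (increasing_numbers n m)

-- ===== LEMMAS AND PROOFS =====

-- floor-division difference detects divisibility: a/d - (a-1)/d = [d ∣ a]  (d > 0)
lemma pv_fd_sub (d a : Int) (hd : 0 < d) :
    PySem.Int.floordiv a d - PySem.Int.floordiv (a - 1) d = if d ∣ a then 1 else 0 := by
  rw [PySem.Int.floordiv_eq_ediv_of_pos hd, PySem.Int.floordiv_eq_ediv_of_pos hd]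
  have hne : d ≠ 0 := hd.ne'
  by_cases h : d ∣ a
  · obtain ⟨q, hq⟩ := h
    rw [if_pos ⟨q, hq⟩, hq, Int.mul_ediv_cancel_left q hne,
      show d * q - 1 = (d - 1) + d * (q - 1) by ring, Int.add_mul_ediv_left _ _ hne,
      Int.ediv_eq_zero_of_lt (by omega) (by omega)]
    ring
  · have key : ∀ r q : Int, 0 < r → r < d → a = r + d * q → a / d - (a - 1) / d = 0 := by
      intro r q hr hrd' heq
      have e1 : a / d = q := by
        rw [heq, Int.add_mul_ediv_left _ _ hne, Int.ediv_eq_zero_of_lt (by omega) (by omega)]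
        ring
      have e2 : (a - 1) / d = q := by
        rw [show a - 1 = (r - 1) + d * q by linarith, Int.add_mul_ediv_left _ _ hne,
          Int.ediv_eq_zero_of_lt (by omega) (by omega)]
        ring
      rw [e1, e2]
      ring
    have hmod : a % d + d * (a / d) = a := Int.emod_add_mul_ediv a d
    have hr0 : 0 ≤ a % d := Int.emod_nonneg a hne
    have hrd : a % d < d := Int.emod_lt_of_pos a hd
    have hr1 : a % d ≠ 0 := fun hc => h (Int.dvd_of_emod_eq_zero hc)
    rw [if_neg h]
    exact key (a % d) (a / d) (by omega) hrd (by linarith)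

-- number of multiples of d in [a, b) as a floor-division difference (a ≤ b, d > 0)
lemma pv_count_mult (d : Int) (hd : 0 < d) (a b : Int) (hab : a ≤ b) :
    ((PySem.List.pyRange a b).countP (fun k => decide (d ∣ k)) : Int)
      = PySem.Int.floordiv (b - 1) d - PySem.Int.floordiv (a - 1) d := by
  induction hlen : (b - a).toNat generalizing a with
  | zero =>
    have hba : a = b := by omega
    subst hba
    rw [PySem.List.pyRange_one_eq_nil le_rfl]
    simp
  | succ k ih =>
    have hab' : a < b := by omega
    rw [PySem.List.pyRange_one_cons hab', List.countP_cons]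
    have h2 := ih (a + 1) (by omega) (by omega)
    have h3 := pv_fd_sub d a hd
    push_cast
    rw [show a + 1 - 1 = a by ring] at h2
    split_ifs with h <;> simp only [decide_eq_true_eq] at h <;> simp [h] at h3 <;> omega

-- characterization of A's inner loop fold
lemma pv_inner_char (i : Int) (L : List Int) (c0 : Nat) (arr : List Int) :
    L.foldl (pvStepA i) ((c0 : Int), arr) =
      (((c0 + L.countP (fun k => decide (PySem.Int.mod k i = 0)) : Nat) : Int),
        arr ++ List.replicate
          (min (c0 + L.countP (fun k => decide (PySem.Int.mod k i = 0))) 2 - min c0 2) i) := by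
  induction L generalizing c0 arr with
  | nil => simp
  | cons k L ih =>
    rw [List.foldl_cons, List.countP_cons]
    by_cases hk : PySem.Int.mod k i = 0
    · have hstep : pvStepA i ((c0 : Int), arr) k
          = (((c0 + 1 : Nat) : Int), if (c0 : Int) + 1 < 3 then arr ++ [i] else arr) := by
        simp [pvStepA, hk]
      rw [hstep]
      have hc1 : (if decide (PySem.Int.mod k i = 0) = true then 1 else 0) = 1 := by simp [hk]
      rw [hc1]
      by_cases hc : c0 ≤ 1
      · rw [if_pos (by omega), ih (c0 + 1) (arr ++ [i]), Prod.mk.injEq,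
          List.append_assoc]
        refine ⟨by omega, ?_⟩
        congr 1
        rw [show min (c0 + (List.countP (fun k => decide (PySem.Int.mod k i = 0)) L + 1)) 2
              - min c0 2
            = (min (c0 + 1 + List.countP (fun k => decide (PySem.Int.mod k i = 0)) L) 2
              - min (c0 + 1) 2) + 1 from by omega,
          List.replicate_succ]
        rfl
      · rw [if_neg (by omega), ih (c0 + 1) arr, Prod.mk.injEq]
        refine ⟨by omega, ?_⟩
        congr 1
        congr 1
        omega
    · have hstep : pvStepA i ((c0 : Int), arr) k = ((c0 : Int), arr) := by
        simp [pvStepA, hk]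
      rw [hstep, ih c0 arr]
      simp [hk]

-- A's whole body for one outer iteration equals B's one-step append
lemma pv_step_eq (n i : Int) (hi : i ≠ 0) (hni : n ≤ i) (arr : List Int) :
    ((PySem.List.pyRange n (i + 1)).foldl (pvStepA i) (0, arr)).2 =
      arr ++ PySem.List.pyRepeat [i]
        (min (PySem.Int.floordiv i |i| - PySem.Int.floordiv (n - 1) |i|) 2) := by
  have hd : 0 < |i| := abs_pos.mpr hi
  have hpred : (fun k => decide (PySem.Int.mod k i = 0)) = (fun k => decide (|i| ∣ k)) := by
    funext k
    simp [PySem.Int.mod_eq_zero_iff_dvd, abs_dvd]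
  have hcount := pv_count_mult |i| hd n (i + 1) (by omega)
  rw [show i + 1 - 1 = i by ring] at hcount
  have h0 : ((0 : Nat) : Int) = (0 : Int) := rfl
  rw [← h0, pv_inner_char i _ 0 arr]
  rw [PySem.List.pyRepeat_singleton]
  rw [hpred, ← hcount]
  simp
  omega

-- both outer folds agree, element by element
lemma pv_outer (n : Int) (L : List Int) (hL : ∀ i ∈ L, i ≠ 0 ∧ n ≤ i) (arr : List Int) :
    L.foldl (fun array i => ((PySem.List.pyRange n (i + 1)).foldl (pvStepA i) (0, array)).2) arr
      = L.foldl (fun out i =>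
          let d := |i|
          let c := PySem.Int.floordiv i d - PySem.Int.floordiv (n - 1) d
          out ++ PySem.List.pyRepeat [i] (min c 2)) arr := by
  induction L generalizing arr with
  | nil => rfl
  | cons i L ih =>
    obtain ⟨hi, hni⟩ := hL i (List.mem_cons_self ..)
    rw [List.foldl_cons, List.foldl_cons, pv_step_eq n i hi hni arr]
    exact ih (fun j hj => hL j (List.mem_cons_of_mem _ hj)) _

-- ===== VERDICT (by name: the statement is the Claim_ definition above) =====
theorem increasing_numbers_spec : Claim_equal_increasing_numbers := by
  intro n m _ hpre
  unfold Spec_increasing_numbers increasing_numbers increasing_numbers_alt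
  apply pv_outer
  intro i hi
  rw [PySem.List.mem_pyRange_one] at hi
  unfold Pre_increasing_numbers at hpre
  constructor <;> omega
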